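-- pv_equiv track=rewrite | github.com/V3NU55/V3NU55.github.io | export_interactive_data.py | classify_models
-- ===== SOURCE A (Python) =====
-- EXCLUDED_MODELS = {"gemini-2.5-pro", "gemini-2.5-flash"}
--
-- FAMILY_DEFS = {
--     "claude": {"color": "#FF6B6B", "prefix": "claude"},
--     "gemini": {"color": "#FFD93D", "prefix": "gemini"},
--     "gpt":    {"color": "#50C878", "prefix": "gpt"},
--     "qwen":   {"color": "#7BB3F0", "prefix": "qwen"},
-- }
--
-- PLOTLY_MARKERS = ["circle", "square", "triangle-up", "triangle-down", "diamond", "hexagon2", "star"]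
--
-- def classify_models(model_names):
--     """Assign family, color, marker to each VLM model."""
--     models_info = {}
--     family_counters = {f: 0 for f in FAMILY_DEFS}
--
--     for name in sorted(model_names):
--         if name.startswith("human") or name.startswith("gif_"):
--             continue
--         if name in EXCLUDED_MODELS:
--             continue
--
--         family = None
--         for fam, fdef in FAMILY_DEFS.items():
--             if name.startswith(fdef["prefix"]):
--                 family = fam
--                 break
--         if family is None:
--             continue
--
--         idx = family_counters[family]
--         family_counters[family] += 1
--
--         # Pretty label
--         label = name.replace("-latest", "").replace("-instruct", "")
--
--         models_info[name] = {
--             "family": family,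
--             "color": FAMILY_DEFS[family]["color"],
--             "marker": PLOTLY_MARKERS[idx % len(PLOTLY_MARKERS)],
--             "label": label,
--         }
--
--     return models_info
-- ===== SOURCE B (Python) =====
-- # B: group-then-emit decomposition — bucket surviving names by family first, then emit
-- # each family's bucket in one enumerated run (no per-family counters threaded through a
-- # single stateful loop). Bucket emission order (FAMILY_DEFS order) coincides with the
-- # alphabetical order of the prefixes, so the resulting dict is identical, order included.
-- EXCLUDED_MODELS = {"gemini-2.5-pro", "gemini-2.5-flash"}
--
-- FAMILY_DEFS = {
--     "claude": {"color": "#FF6B6B", "prefix": "claude"},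
--     "gemini": {"color": "#FFD93D", "prefix": "gemini"},
--     "gpt":    {"color": "#50C878", "prefix": "gpt"},
--     "qwen":   {"color": "#7BB3F0", "prefix": "qwen"},
-- }
--
-- PLOTLY_MARKERS = ["circle", "square", "triangle-up", "triangle-down", "diamond", "hexagon2", "star"]
--
-- def _family_of(name):
--     if name.startswith("human") or name.startswith("gif_"):
--         return None
--     if name in EXCLUDED_MODELS:
--         return None
--     for fam, fdef in FAMILY_DEFS.items():
--         if name.startswith(fdef["prefix"]):
--             return fam
--     return None
--
-- def classify_models(model_names):
--     """Assign family, color, marker to each VLM model."""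
--     # Pass 1: bucket the surviving names by family (sorted order kept inside each bucket).
--     groups = {f: [] for f in FAMILY_DEFS}
--     for name in sorted(model_names):
--         fam = _family_of(name)
--         if fam is not None:
--             groups[fam].append(name)
--     # Pass 2: one enumerated run per family bucket.
--     models_info = {}
--     for fam, names in groups.items():
--         fdef = FAMILY_DEFS[fam]
--         for i, name in enumerate(names):
--             models_info[name] = {
--                 "family": fam,
--                 "color": fdef["color"],
--                 "marker": PLOTLY_MARKERS[i % len(PLOTLY_MARKERS)],
--                 "label": name.replace("-latest", "").replace("-instruct", ""),
--             }
--     return models_info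
-- ===== Notes on version B (the rewrite author's own statement) =====
-- stated objective: alternative
-- what changed: Replaces A's single stateful loop threading mutable per-family counters with a two-pass group-then-emit structure: first bucket the surviving sorted names into a family->names dict, then emit each bucket in one enumerated run (the enumerate position is the marker index); bucket order equals A's sorted key order because the family prefixes are themselves alphabetical.
import Mathlib
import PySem

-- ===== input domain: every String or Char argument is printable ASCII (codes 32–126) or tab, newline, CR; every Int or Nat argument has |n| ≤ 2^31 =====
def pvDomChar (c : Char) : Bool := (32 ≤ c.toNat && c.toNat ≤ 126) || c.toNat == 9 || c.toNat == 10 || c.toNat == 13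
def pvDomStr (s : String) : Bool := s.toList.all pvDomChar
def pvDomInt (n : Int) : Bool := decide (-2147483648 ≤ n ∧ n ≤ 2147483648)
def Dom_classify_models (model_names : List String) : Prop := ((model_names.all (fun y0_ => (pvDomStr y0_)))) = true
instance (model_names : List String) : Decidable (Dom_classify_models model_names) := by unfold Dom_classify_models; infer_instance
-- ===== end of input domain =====

-- B replaces A's single stateful loop with mutable per-family counters by a two-pass
-- group-then-emit structure (bucket surviving names by family, then emit each bucket in
-- one enumerated run); objective: alternative structure, same cost.

-- ===== PORT A =====
-- module constants: FAMILY_DEFS as (family, color, prefix) triples, PLOTLY_MARKERS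
def pvFamDefs : List (String × String × String) :=
  [("claude", "#FF6B6B", "claude"), ("gemini", "#FFD93D", "gemini"),
   ("gpt", "#50C878", "gpt"), ("qwen", "#7BB3F0", "qwen")]

def pvMarkers : List String :=
  ["circle", "square", "triangle-up", "triangle-down", "diamond", "hexagon2", "star"]

-- FAMILY_DEFS[family]["color"]; family is always a key, so the .getD "" default is never used
def pvColorOf (family : String) : String :=
  ((pvFamDefs.find? (fun f => f.1 == family)).map (fun f => f.2.1)).getD ""

-- PLOTLY_MARKERS[idx % len(PLOTLY_MARKERS)]; the mod puts the index in range, so .getD "" never fires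
def pvMarkerAt (idx : Int) : String :=
  ((PySem.List.pyGet? pvMarkers (PySem.Int.mod idx (pvMarkers.length : Int)))).getD ""

def pvLabelOf (name : String) : String :=
  PySem.Str.replace (PySem.Str.replace name "-latest" "") "-instruct" ""

-- the four-entry info dict both Pythons build for a surviving name
def pvInfo (family : String) (idx : Int) (name : String) : List (String × String) :=
  [("family", family), ("color", pvColorOf family), ("marker", pvMarkerAt idx),
   ("label", pvLabelOf name)]

-- the body of A's for-loop, one step over the state (models_info, family_counters)
def pvStepA (st : PySem.Dict String (List (String × String)) × PySem.Dict String Int)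
    (name : String) : PySem.Dict String (List (String × String)) × PySem.Dict String Int :=
  if PySem.Str.startswith name "human" || PySem.Str.startswith name "gif_" then st
  else if (["gemini-2.5-pro", "gemini-2.5-flash"] : List String).contains name then st
  else
    match pvFamDefs.find? (fun f => PySem.Str.startswith name f.2.2) with
    | none => st
    | some f =>
      let idx := st.2.getD f.1 0
      (st.1.insert name (pvInfo f.1 idx name), st.2.insert f.1 (idx + 1))

def classify_models (model_names : List String) : List (String × List (String × String)) :=
  (((PySem.List.sorted model_names (fun x => x) false).foldl pvStepA
      (PySem.Dict.empty,
       PySem.Dict.ofList [("claude", 0), ("gemini", 0), ("gpt", 0), ("qwen", 0)])).1).items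

-- ===== PORT B =====
-- _family_of(name): the filters, then the first matching FAMILY_DEFS prefix
def pvFamilyOf (name : String) : Option String :=
  if PySem.Str.startswith name "human" || PySem.Str.startswith name "gif_" then none
  else if (["gemini-2.5-pro", "gemini-2.5-flash"] : List String).contains name then none
  else (pvFamDefs.find? (fun f => PySem.Str.startswith name f.2.2)).map (fun f => f.1)

-- pass 1 body: groups[fam].append(name)  (fam is always a pre-seeded key)
def pvGroupStep (g : PySem.Dict String (List String)) (name : String) :
    PySem.Dict String (List String) :=
  match pvFamilyOf name with
  | none => g
  | some f => g.modify f [] (fun v => v ++ [name])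

-- pass 2 body: one enumerated run over a family's bucket
def pvEmitFam (d : PySem.Dict String (List (String × String))) (q : String × List String) :
    PySem.Dict String (List (String × String)) :=
  (PySem.List.enumerate q.2 0).foldl (fun d p => d.insert p.2 (pvInfo q.1 p.1 p.2)) d

def classify_models_alt (model_names : List String) : List (String × List (String × String)) :=
  let groups := (PySem.List.sorted model_names (fun x => x) false).foldl pvGroupStep
      (PySem.Dict.ofList [("claude", ([] : List String)), ("gemini", []), ("gpt", []), ("qwen", [])])
  (groups.items.foldl pvEmitFam PySem.Dict.empty).items

-- ===== PRECONDITION & SPEC =====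
def Spec_classify_models (model_names : List String) (out : List (String × List (String × String))) : Prop := out = classify_models_alt model_names
instance (model_names : List String) (out : List (String × List (String × String))) : Decidable (Spec_classify_models model_names out) := by unfold Spec_classify_models; infer_instance

-- ===== CLAIM (what is proved, stated in full; the proofs are below) =====
def Claim_equal_classify_models : Prop := ∀ (model_names : List String), Dom_classify_models model_names → Spec_classify_models model_names (classify_models model_names)

-- ===== LEMMAS AND PROOFS =====

-- the surviving (family, name) pairs of a name list, in order
def pvEntries (l : List String) : List (String × String) :=
  l.filterMap (fun n => (pvFamilyOf n).map (fun f => (f, n)))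

-- a fold whose step consults pvFamilyOf is a fold over the surviving pairs
theorem pv_foldFam {σ : Type} (step : σ → String → String → σ) :
    ∀ (l : List String) (st : σ),
    l.foldl (fun st n => match pvFamilyOf n with | none => st | some f => step st f n) st
      = (pvEntries l).foldl (fun st p => step st p.1 p.2) st := by
  intro l
  induction l with
  | nil => intro st; rfl
  | cons n t ih =>
    intro st
    cases h : pvFamilyOf n <;>
      simp only [pvEntries, List.foldl_cons, List.filterMap_cons, h, Option.map_none,
        Option.map_some] <;> exact ih _

-- A's loop body, rephrased through pvFamilyOf
theorem pvStepA_eq (st : PySem.Dict String (List (String × String)) × PySem.Dict String Int)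
    (n : String) :
    pvStepA st n = (match pvFamilyOf n with
      | none => st
      | some f => (st.1.insert n (pvInfo f (st.2.getD f 0) n),
                   st.2.insert f (st.2.getD f 0 + 1))) := by
  unfold pvStepA pvFamilyOf
  split_ifs
  · rfl
  · rfl
  · cases hf : pvFamDefs.find? (fun f => PySem.Str.startswith n f.2.2) <;> rfl

-- the (name, info) pairs A writes, with the counter dict threaded through
def pvPairs : List (String × String) → PySem.Dict String Int →
    List (String × List (String × String))
  | [], _ => []
  | (f, n) :: t, cnt =>
    (n, pvInfo f (cnt.getD f 0) n) :: pvPairs t (cnt.insert f (cnt.getD f 0 + 1))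

-- the counter dict after processing a list of pairs
def pvCntAfter : List (String × String) → PySem.Dict String Int → PySem.Dict String Int
  | [], cnt => cnt
  | (f, _) :: t, cnt => pvCntAfter t (cnt.insert f (cnt.getD f 0 + 1))

-- A's fold over the surviving pairs is the insert-fold of pvPairs
theorem pvA_pairs : ∀ (es : List (String × String))
    (d : PySem.Dict String (List (String × String))) (cnt : PySem.Dict String Int),
    (es.foldl (fun st p => (st.1.insert p.2 (pvInfo p.1 (st.2.getD p.1 0) p.2),
        st.2.insert p.1 (st.2.getD p.1 0 + 1))) (d, cnt)).1
      = (pvPairs es cnt).foldl (fun d p => d.insert p.1 p.2) d := by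
  intro es
  induction es with
  | nil => intro d cnt; rfl
  | cons e t ih =>
    intro d cnt
    obtain ⟨f, n⟩ := e
    simp only [List.foldl_cons, pvPairs]
    exact ih _ _

theorem pvPairs_append (l1 l2 : List (String × String)) :
    ∀ cnt, pvPairs (l1 ++ l2) cnt = pvPairs l1 cnt ++ pvPairs l2 (pvCntAfter l1 cnt) := by
  induction l1 with
  | nil => intro cnt; rfl
  | cons e t ih =>
    intro cnt
    obtain ⟨f, n⟩ := e
    simp only [List.cons_append, pvPairs, pvCntAfter, ih, List.cons_append]

theorem pv_getD_cntAfter (l : List (String × String)) :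
    ∀ (cnt : PySem.Dict String Int) (g : String), g ∉ l.map Prod.fst →
    (pvCntAfter l cnt).getD g 0 = cnt.getD g 0 := by
  induction l with
  | nil => intro cnt g _; rfl
  | cons e t ih =>
    intro cnt g hg
    obtain ⟨f, n⟩ := e
    simp only [List.map_cons, List.mem_cons, not_or] at hg
    simp only [pvCntAfter]
    rw [ih _ g hg.2, PySem.Dict.getD_insert_of_ne _ _ _ hg.1]

-- a homogeneous block: the threaded counter is the enumerate index
theorem pvPairs_homog (f : String) : ∀ (names : List String) (cnt : PySem.Dict String Int),
    pvPairs (names.map (fun n => (f, n))) cnt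
      = (PySem.List.enumerate names (cnt.getD f 0)).map (fun p => (p.2, pvInfo f p.1 p.2)) := by
  intro names
  induction names with
  | nil => intro cnt; simp [pvPairs, PySem.List.enumerate_nil]
  | cons n t ih =>
    intro cnt
    simp only [List.map_cons, pvPairs, PySem.List.enumerate_cons, List.map_cons]
    rw [ih, PySem.Dict.getD_insert_self]

-- a filter on the first component is a map over its names
theorem pv_filter_shape (f : String) : ∀ (l : List (String × String)),
    l.filter (fun p => p.1 == f)
      = ((l.filter (fun p => p.1 == f)).map Prod.snd).map (fun n => (f, n)) := by
  intro l
  induction l with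
  | nil => rfl
  | cons e t ih =>
    obtain ⟨g, n⟩ := e
    by_cases h : g = f
    · subst h; simpa using ih
    · simp only [List.filter_cons]
      have : ((g, n).1 == f) = false := by simpa using h
      rw [this]
      simpa using ih

-- what pvFamilyOf guarantees about a surviving name
theorem pvFamilyOf_mem (n f : String) (h : pvFamilyOf n = some f) :
    (f = "claude" ∨ f = "gemini" ∨ f = "gpt" ∨ f = "qwen")
      ∧ PySem.Str.startswith n f = true := by
  unfold pvFamilyOf at h
  split_ifs at h
  cases hf : pvFamDefs.find? (fun t => PySem.Str.startswith n t.2.2) with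
  | none => rw [hf] at h; simp at h
  | some t =>
    rw [hf] at h
    simp only [Option.map_some, Option.some_inj] at h
    have hmem := List.mem_of_find?_eq_some hf
    have hpred := List.find?_some hf
    subst h
    simp only [pvFamDefs, List.mem_cons, List.not_mem_nil, or_false] at hmem
    rcases hmem with h | h | h | h <;> subst h <;> simp_all

-- lexicographic comparison after a common prefix
theorem pv_lex_middle (cp : List Char) (ca cb : Char) (x y : List Char) (h : ca < cb) :
    (cp ++ ca :: x) < (cp ++ cb :: y) := by
  induction cp with
  | nil => exact List.Lex.rel h
  | cons c rest ih => exact List.Lex.cons ih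

-- two names whose recognised prefixes differ at some position are ordered like the prefixes
theorem pv_sw_lt (a b p q : String) (cp : List Char) (ca cb : Char) (pa pb : List Char)
    (hpa : p.toList = cp ++ ca :: pa) (hpb : q.toList = cp ++ cb :: pb)
    (ha : PySem.Str.startswith a p = true) (hb : PySem.Str.startswith b q = true)
    (h : ca < cb) : a < b := by
  rw [String.lt_iff_toList_lt]
  rw [PySem.Str.startswith_eq, PySem.Chars.startswith_iff] at ha hb
  obtain ⟨ta, hta⟩ := ha
  obtain ⟨tb, htb⟩ := hb
  rw [← hta, ← htb, hpa, hpb]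
  simp only [List.append_assoc, List.cons_append]
  exact pv_lex_middle cp ca cb _ _ h

-- family rank in FAMILY_DEFS (= alphabetical-prefix) order; proof-side only
def pvRank (f : String) : Nat :=
  if f = "claude" then 0 else if f = "gemini" then 1 else if f = "gpt" then 2 else 3

-- name order forces family-rank order
set_option maxHeartbeats 1000000 in
theorem pv_rank_mono (n1 f1 n2 f2 : String) (h1 : pvFamilyOf n1 = some f1)
    (h2 : pvFamilyOf n2 = some f2) (hle : n1 ≤ n2) : pvRank f1 ≤ pvRank f2 := by
  obtain ⟨hm1, hs1⟩ := pvFamilyOf_mem _ _ h1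
  obtain ⟨hm2, hs2⟩ := pvFamilyOf_mem _ _ h2
  by_contra hcon
  rw [not_le] at hcon
  have hlt : n2 < n1 := by
    rcases hm1 with h | h | h | h <;> subst h <;>
      rcases hm2 with h' | h' | h' | h' <;> subst h' <;>
      simp [pvRank] at hcon <;>
      first
        | omega
        | exact pv_sw_lt n2 n1 "claude" "gemini" [] 'c' 'g' ['l','a','u','d','e']
            ['e','m','i','n','i'] (by decide) (by decide) hs2 hs1 (by decide)
        | exact pv_sw_lt n2 n1 "claude" "gpt" [] 'c' 'g' ['l','a','u','d','e']
            ['p','t'] (by decide) (by decide) hs2 hs1 (by decide)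
        | exact pv_sw_lt n2 n1 "gemini" "gpt" ['g'] 'e' 'p' ['m','i','n','i']
            ['t'] (by decide) (by decide) hs2 hs1 (by decide)
        | exact pv_sw_lt n2 n1 "claude" "qwen" [] 'c' 'q' ['l','a','u','d','e']
            ['w','e','n'] (by decide) (by decide) hs2 hs1 (by decide)
        | exact pv_sw_lt n2 n1 "gemini" "qwen" [] 'g' 'q' ['e','m','i','n','i']
            ['w','e','n'] (by decide) (by decide) hs2 hs1 (by decide)
        | exact pv_sw_lt n2 n1 "gpt" "qwen" [] 'g' 'q' ['p','t']
            ['w','e','n'] (by decide) (by decide) hs2 hs1 (by decide)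
  exact absurd hle (not_le.mpr hlt)

-- the surviving pairs of a sorted list have nondecreasing family rank
theorem pv_entries_rank_pairwise (l : List String) :
    (pvEntries (PySem.List.sorted l (fun x => x) false)).Pairwise
      (fun p q => pvRank p.1 ≤ pvRank q.1) := by
  unfold pvEntries
  rw [List.pairwise_filterMap]
  have hs := PySem.List.sorted_pairwise l (fun x => x)
  refine hs.imp ?_
  intro a b hab p hp q hq
  rw [Option.map_eq_some_iff] at hp hq
  obtain ⟨fa, hfa, rfl⟩ := hp
  obtain ⟨fb, hfb, rfl⟩ := hq
  exact pv_rank_mono a fa b fb hfa hfb hab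

-- a rank-monotone list over the four families is its four family blocks in order
theorem pv_grouped : ∀ (l : List (String × String)),
    (∀ p ∈ l, p.1 = "claude" ∨ p.1 = "gemini" ∨ p.1 = "gpt" ∨ p.1 = "qwen") →
    l.Pairwise (fun p q => pvRank p.1 ≤ pvRank q.1) →
    l = l.filter (fun p => p.1 == "claude") ++ l.filter (fun p => p.1 == "gemini")
        ++ l.filter (fun p => p.1 == "gpt") ++ l.filter (fun p => p.1 == "qwen") := by
  intro l
  induction l with
  | nil => intro _ _; rfl
  | cons e t ih =>
    intro hmem hpw
    rw [List.pairwise_cons] at hpw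
    have hrest := ih (fun p hp => hmem p (by simp [hp])) hpw.2
    have hnil : ∀ (g : String), pvRank g < pvRank e.1 →
        t.filter (fun p => p.1 == g) = [] := by
      intro g hg
      rw [List.filter_eq_nil_iff]
      intro q hq hq1
      have hle := hpw.1 q hq
      rw [beq_iff_eq] at hq1
      rw [hq1] at hle
      omega
    rcases hmem e (by simp) with h | h | h | h
    · simp only [List.filter_cons, h, beq_iff_eq, String.reduceEq, reduceIte,
        List.cons_append]
      rw [← hrest]
    · have hc := hnil "claude" (by simp [pvRank, h])
      simp only [List.filter_cons, h, beq_iff_eq, String.reduceEq, reduceIte]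
      rw [hc, List.nil_append]
      conv_lhs => rw [hrest, hc]
      rfl
    · have hc := hnil "claude" (by simp [pvRank, h])
      have hg := hnil "gemini" (by simp [pvRank, h])
      simp only [List.filter_cons, h, beq_iff_eq, String.reduceEq, reduceIte]
      rw [hc, hg, List.nil_append, List.nil_append]
      conv_lhs => rw [hrest, hc, hg]
      rfl
    · have hc := hnil "claude" (by simp [pvRank, h])
      have hg := hnil "gemini" (by simp [pvRank, h])
      have hp := hnil "gpt" (by simp [pvRank, h])
      simp only [List.filter_cons, h, beq_iff_eq, String.reduceEq, reduceIte]
      rw [hc, hg, hp, List.nil_append, List.nil_append, List.nil_append]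
      conv_lhs => rw [hrest, hc, hg, hp]
      rfl

-- Set.update adds nothing when every element is already present
theorem pv_set_update_id (s : PySem.Set String) (l : List String)
    (h : ∀ x ∈ l, x ∈ s) : PySem.Set.update s l = s := by
  induction l generalizing s with
  | nil => simp [PySem.Set.update]
  | cons x t ih =>
    have hx : s.add x = s := by simp [PySem.Set.add, h x (by simp)]
    simp only [PySem.Set.update] at *
    rw [List.foldl_cons, hx]
    exact ih s (fun y hy => h y (by simp [hy]))

-- every surviving pair records its name's family
theorem pv_mem_entries (l : List String) (p : String × String) (hp : p ∈ pvEntries l) :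
    pvFamilyOf p.2 = some p.1 := by
  unfold pvEntries at hp
  rw [List.mem_filterMap] at hp
  obtain ⟨n, _, h⟩ := hp
  rw [Option.map_eq_some_iff] at h
  obtain ⟨f, hf, rfl⟩ := h
  exact hf

-- pass 2 over one bucket is an insert-fold over its (name, info) pairs
theorem pvEmit_eq (d : PySem.Dict String (List (String × String))) (f : String)
    (names : List String) :
    pvEmitFam d (f, names)
      = ((PySem.List.enumerate names 0).map (fun p => (p.2, pvInfo f p.1 p.2))).foldl
          (fun d r => d.insert r.1 r.2) d := by
  unfold pvEmitFam
  rw [List.foldl_map]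

-- ===== VERDICT (by name: the statement is the Claim_ definition above) =====
set_option maxHeartbeats 1000000 in
theorem classify_models_spec : Claim_equal_classify_models := by
  intro model_names _
  unfold Spec_classify_models
  show (((PySem.List.sorted model_names (fun x => x) false).foldl pvStepA
      (PySem.Dict.empty,
       PySem.Dict.ofList [("claude", 0), ("gemini", 0), ("gpt", 0), ("qwen", 0)])).1).items
    = ((((PySem.List.sorted model_names (fun x => x) false).foldl pvGroupStep
        (PySem.Dict.ofList
          [("claude", ([] : List String)), ("gemini", []), ("gpt", []), ("qwen", [])])).items.foldl
        pvEmitFam PySem.Dict.empty).items)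
  set l := PySem.List.sorted model_names (fun x => x) false with hl
  set es := pvEntries l with hes
  set cnt0 := PySem.Dict.ofList ([("claude", 0), ("gemini", 0), ("gpt", 0), ("qwen", 0)] :
    List (String × Int)) with hcnt0
  set g0 := PySem.Dict.ofList
    [("claude", ([] : List String)), ("gemini", []), ("gpt", []), ("qwen", [])] with hg0
  -- ---- A side: the insert-fold of the threaded pairs ----
  have hA1 : l.foldl pvStepA (PySem.Dict.empty, cnt0)
      = es.foldl (fun st p => (st.1.insert p.2 (pvInfo p.1 (st.2.getD p.1 0) p.2),
          st.2.insert p.1 (st.2.getD p.1 0 + 1))) (PySem.Dict.empty, cnt0) := by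
    rw [show pvStepA = (fun st n => match pvFamilyOf n with
        | none => st
        | some f => (st.1.insert n (pvInfo f (st.2.getD f 0) n),
            st.2.insert f (st.2.getD f 0 + 1))) from funext fun st => funext fun n => pvStepA_eq st n]
    exact pv_foldFam _ l _
  -- ---- grouping of the surviving pairs ----
  have hmem4 : ∀ p ∈ es, p.1 = "claude" ∨ p.1 = "gemini" ∨ p.1 = "gpt" ∨ p.1 = "qwen" :=
    fun p hp => (pvFamilyOf_mem p.2 p.1 (pv_mem_entries l p hp)).1
  have hgrp := pv_grouped es hmem4 (by rw [hes, hl]; exact pv_entries_rank_pairwise model_names)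
  have hFc := pv_filter_shape "claude" es
  have hFg := pv_filter_shape "gemini" es
  have hFp := pv_filter_shape "gpt" es
  have hFq := pv_filter_shape "qwen" es
  set Nc := (es.filter (fun p => p.1 == "claude")).map Prod.snd with hNc
  set Ng := (es.filter (fun p => p.1 == "gemini")).map Prod.snd with hNg
  set Np := (es.filter (fun p => p.1 == "gpt")).map Prod.snd with hNp
  set Nq := (es.filter (fun p => p.1 == "qwen")).map Prod.snd with hNq
  -- the threaded pairs are the four enumerated blocks in order
  have hpairs : pvPairs es cnt0
      = ((PySem.List.enumerate Nc 0).map (fun p => (p.2, pvInfo "claude" p.1 p.2)))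
        ++ (((PySem.List.enumerate Ng 0).map (fun p => (p.2, pvInfo "gemini" p.1 p.2)))
        ++ (((PySem.List.enumerate Np 0).map (fun p => (p.2, pvInfo "gpt" p.1 p.2)))
        ++ ((PySem.List.enumerate Nq 0).map (fun p => (p.2, pvInfo "qwen" p.1 p.2))))) := by
    conv_lhs => rw [hgrp, hFc, hFg, hFp, hFq]
    rw [pvPairs_append, pvPairs_append, pvPairs_append]
    rw [pvPairs_homog, pvPairs_homog, pvPairs_homog, pvPairs_homog]
    rw [pv_getD_cntAfter _ _ "gemini" (by simp [List.map_map]),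
        pv_getD_cntAfter _ _ "gpt" (by simp [List.map_map]),
        pv_getD_cntAfter _ _ "qwen" (by simp [List.map_map])]
    rw [show cnt0.getD "claude" 0 = 0 from by rw [hcnt0]; decide,
        show cnt0.getD "gemini" 0 = 0 from by rw [hcnt0]; decide,
        show cnt0.getD "gpt" 0 = 0 from by rw [hcnt0]; decide,
        show cnt0.getD "qwen" 0 = 0 from by rw [hcnt0]; decide]
    simp only [List.append_assoc]
  -- ---- B side: the grouping dict and its four buckets ----
  have hB1 : l.foldl pvGroupStep g0
      = es.foldl (fun g p => g.modify p.1 [] (fun v => v ++ [p.2])) g0 :=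
    pv_foldFam _ l _
  set G := es.foldl (fun g p => g.modify p.1 [] (fun v => v ++ [p.2])) g0 with hG
  have hkeys : G.keys = ["claude", "gemini", "gpt", "qwen"] := by
    rw [hG, PySem.Dict.keys_foldl_modify_key es Prod.fst [] (fun _ p v => v ++ [p.2]) g0]
    rw [pv_set_update_id]
    · rw [hg0]; decide
    · intro x hx
      rw [List.mem_map] at hx
      obtain ⟨p, hp, rfl⟩ := hx
      have h4 := hmem4 p hp
      rw [hg0]
      rcases h4 with h | h | h | h <;> rw [h] <;> decide
  have hnodup : G.keys.Nodup := by
    rw [hG]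
    exact PySem.Dict.nodup_keys_foldl_modify_key es Prod.fst [] (fun _ p v => v ++ [p.2]) g0
      (by rw [hg0]; decide)
  have hitems : G.items
      = [("claude", Nc), ("gemini", Ng), ("gpt", Np), ("qwen", Nq)] := by
    rw [PySem.Dict.items_eq_map_keys G hnodup [], hkeys]
    simp only [List.map_cons, List.map_nil]
    rw [hG]
    rw [PySem.Dict.getD_foldl_modify_append es g0 "claude",
        PySem.Dict.getD_foldl_modify_append es g0 "gemini",
        PySem.Dict.getD_foldl_modify_append es g0 "gpt",
        PySem.Dict.getD_foldl_modify_append es g0 "qwen"]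
    rw [show g0.getD "claude" [] = [] from by rw [hg0]; decide,
        show g0.getD "gemini" [] = [] from by rw [hg0]; decide,
        show g0.getD "gpt" [] = [] from by rw [hg0]; decide,
        show g0.getD "qwen" [] = [] from by rw [hg0]; decide]
    simp only [List.nil_append]
    rfl
  -- ---- assemble ----
  rw [hA1, pvA_pairs, hpairs, hB1, hitems]
  simp only [List.foldl_cons, List.foldl_nil]
  rw [pvEmit_eq, pvEmit_eq, pvEmit_eq, pvEmit_eq]
  rw [← List.foldl_append, ← List.foldl_append, ← List.foldl_append]
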